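-- pv_equiv track=rewrite | github.com/muratcankoylan/memory-routing-agent | training/prepare_data.py | clean_categories
-- ===== SOURCE A (Python) =====
-- from typing import List, Dict, Any
--
-- VALID_CATEGORIES = {
--     "company.brand_core", "company.strategic_signatures", "company.knowledge_artifacts",
--     "company.business_priorities", "company.tools_config", "company.performance_context",
--     "user.communication_style", "user.strategic_approach", "user.role_context",
--     "user.workflow_patterns", "user.session_history", "user.interaction_preferences",
--     "none"
-- }
--
-- def clean_categories(categories: List[str]) -> List[str]:
--     """Clean and validate categories."""
--     cleaned = []
--     for cat in categories:
--         cat_lower = cat.strip().lower()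
--         if cat_lower in VALID_CATEGORIES:
--             cleaned.append(cat_lower)
--
--     # Remove "none" if other categories exist
--     if len(cleaned) > 1 and "none" in cleaned:
--         cleaned = [c for c in cleaned if c != "none"]
--
--     # Deduplicate while preserving order
--     seen = set()
--     result = []
--     for c in cleaned:
--         if c not in seen:
--             seen.add(c)
--             result.append(c)
--
--     return result if result else ["none"]
-- ===== SOURCE B (Python) =====
-- from typing import List
--
-- VALID_CATEGORIES = {
--     "company.brand_core", "company.strategic_signatures", "company.knowledge_artifacts",
--     "company.business_priorities", "company.tools_config", "company.performance_context",
--     "user.communication_style", "user.strategic_approach", "user.role_context",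
--     "user.workflow_patterns", "user.session_history", "user.interaction_preferences",
--     "none"
-- }
--
-- def clean_categories(categories: List[str]) -> List[str]:
--     """Clean and validate categories in a single pass.
--
--     "none" never needs to be kept while scanning: it only appears in the
--     output when nothing else survives, which the empty fallback covers.
--     """
--     seen = set()
--     result = []
--     for cat in categories:
--         c = cat.strip().lower()
--         if c in VALID_CATEGORIES and c != "none" and c not in seen:
--             seen.add(c)
--             result.append(c)
--     return result if result else ["none"]
-- ===== Notes on version B (the rewrite author's own statement) =====
-- stated objective: simpler
-- what changed: B fuses A's three passes (validity filter, conditional 'none'-removal, dedup loop) into a single loop that drops 'none' outright, relying on the empty-result fallback to reproduce the lone-'none' case.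
import Mathlib
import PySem

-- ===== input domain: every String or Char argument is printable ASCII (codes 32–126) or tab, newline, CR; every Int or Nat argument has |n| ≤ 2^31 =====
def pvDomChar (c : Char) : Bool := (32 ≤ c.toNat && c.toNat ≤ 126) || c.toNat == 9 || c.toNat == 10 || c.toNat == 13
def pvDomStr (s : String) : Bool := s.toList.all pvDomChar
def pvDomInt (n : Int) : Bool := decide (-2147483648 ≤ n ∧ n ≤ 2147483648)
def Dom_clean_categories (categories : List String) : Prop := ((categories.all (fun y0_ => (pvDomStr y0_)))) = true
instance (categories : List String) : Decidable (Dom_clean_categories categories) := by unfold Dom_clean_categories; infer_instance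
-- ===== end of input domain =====

-- B fuses A's filter pass, conditional "none"-removal pass and dedup pass into one
-- loop that drops "none" outright (objective: simpler; return values proved equal).

-- shared module constant VALID_CATEGORIES (a Python set)
def VALID_CATEGORIES : PySem.Set String := PySem.Set.ofList
  [ "company.brand_core", "company.strategic_signatures", "company.knowledge_artifacts",
    "company.business_priorities", "company.tools_config", "company.performance_context",
    "user.communication_style", "user.strategic_approach", "user.role_context",
    "user.workflow_patterns", "user.session_history", "user.interaction_preferences",
    "none" ]

-- ===== PORT A =====
def clean_categories (categories : List String) : List String :=
  -- first loop: collect valid lowered/stripped categories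
  let cleaned : List String := categories.foldl
    (fun acc cat =>
      let cat_lower := PySem.Str.lower (PySem.Str.strip cat)
      if PySem.Set.contains VALID_CATEGORIES cat_lower then acc ++ [cat_lower] else acc) []
  -- remove "none" if other categories exist
  let cleaned : List String :=
    if cleaned.length > 1 ∧ "none" ∈ cleaned then cleaned.filter (fun c => c ≠ "none") else cleaned
  -- deduplicate while preserving order (seen : set, result : list)
  let st : PySem.Set String × List String := cleaned.foldl
    (fun st c =>
      if PySem.Set.contains st.1 c then st else (PySem.Set.add st.1 c, st.2 ++ [c]))
    (PySem.Set.empty, [])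
  if st.2 ≠ [] then st.2 else ["none"]

-- ===== PORT B =====
def clean_categories_alt (categories : List String) : List String :=
  let st : PySem.Set String × List String := categories.foldl
    (fun st cat =>
      let c := PySem.Str.lower (PySem.Str.strip cat)
      if PySem.Set.contains VALID_CATEGORIES c ∧ c ≠ "none" ∧ ¬ PySem.Set.contains st.1 c
      then (PySem.Set.add st.1 c, st.2 ++ [c]) else st)
    (PySem.Set.empty, [])
  if st.2 ≠ [] then st.2 else ["none"]

-- ===== PRECONDITION & SPEC =====
def Spec_clean_categories (categories : List String) (out : List String) : Prop := out = clean_categories_alt categories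
instance (categories : List String) (out : List String) : Decidable (Spec_clean_categories categories out) := by unfold Spec_clean_categories; infer_instance

-- ===== CLAIM (what is proved, stated in full; the proofs are below) =====
def Claim_equal_clean_categories : Prop := ∀ (categories : List String), Dom_clean_categories categories → Spec_clean_categories categories (clean_categories categories)

-- ===== LEMMAS AND PROOFS =====

-- A's dedup loop keeps its two state components equal; it is foldl Set.add on the first.
theorem dedup_loop_eq (L : List String) (s : PySem.Set String) :
    L.foldl (fun st c => if PySem.Set.contains st.1 c then st else (PySem.Set.add st.1 c, st.2 ++ [c]))
      (s, (s : List String)) = (L.foldl PySem.Set.add s, L.foldl PySem.Set.add s) := by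
  induction L generalizing s with
  | nil => rfl
  | cons c L ih =>
    simp only [List.foldl_cons]
    by_cases h : c ∈ s
    · have hb : PySem.Set.contains s c = true := (PySem.Set.contains_iff s c).mpr h
      have ha : PySem.Set.add s c = s := by simp [PySem.Set.add, h]
      rw [if_pos hb, ha]
      exact ih s
    · have hb : ¬ (PySem.Set.contains s c = true) := fun hh => h ((PySem.Set.contains_iff s c).mp hh)
      have ha : PySem.Set.add s c = s ++ [c] := by simp [PySem.Set.add, h]
      rw [if_neg hb, ha]
      exact ih (s ++ [c])

-- B's loop likewise keeps seen = result, and equals foldl Set.add over the filtered mapped list.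
theorem alt_loop_eq (L : List String) (s : PySem.Set String) :
    L.foldl (fun st cat =>
        let c := PySem.Str.lower (PySem.Str.strip cat)
        if PySem.Set.contains VALID_CATEGORIES c ∧ c ≠ "none" ∧ ¬ PySem.Set.contains st.1 c
        then (PySem.Set.add st.1 c, st.2 ++ [c]) else st) (s, (s : List String))
    = (((L.map (fun cat => PySem.Str.lower (PySem.Str.strip cat))).filter
          (fun c => PySem.Set.contains VALID_CATEGORIES c && c != "none")).foldl PySem.Set.add s,
       ((L.map (fun cat => PySem.Str.lower (PySem.Str.strip cat))).filter
          (fun c => PySem.Set.contains VALID_CATEGORIES c && c != "none")).foldl PySem.Set.add s) := by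
  induction L generalizing s with
  | nil => rfl
  | cons cat L ih =>
    simp only [List.foldl_cons, List.map_cons, List.filter_cons]
    by_cases hv : PySem.Set.contains VALID_CATEGORIES (PySem.Str.lower (PySem.Str.strip cat)) = true
      ∧ PySem.Str.lower (PySem.Str.strip cat) ≠ "none"
    · have hbool : (PySem.Set.contains VALID_CATEGORIES (PySem.Str.lower (PySem.Str.strip cat))
          && PySem.Str.lower (PySem.Str.strip cat) != "none") = true := by
        simp [(PySem.Set.contains_iff _ _).mp hv.1, hv.2]
      rw [hbool]
      simp only [if_true]
      by_cases hs : PySem.Str.lower (PySem.Str.strip cat) ∈ s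
      · have hsc : PySem.Set.contains s (PySem.Str.lower (PySem.Str.strip cat)) = true :=
          (PySem.Set.contains_iff s _).mpr hs
        have hcond : ¬ (PySem.Set.contains VALID_CATEGORIES (PySem.Str.lower (PySem.Str.strip cat)) = true
            ∧ PySem.Str.lower (PySem.Str.strip cat) ≠ "none"
            ∧ ¬ PySem.Set.contains s (PySem.Str.lower (PySem.Str.strip cat)) = true) := by
          intro hh; exact hh.2.2 hsc
        rw [if_neg hcond, List.foldl_cons]
        have ha : PySem.Set.add s (PySem.Str.lower (PySem.Str.strip cat)) = s := by
          simp [PySem.Set.add, hs]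
        rw [ha]
        exact ih s
      · have hsc : ¬ PySem.Set.contains s (PySem.Str.lower (PySem.Str.strip cat)) = true :=
          fun hh => hs ((PySem.Set.contains_iff s _).mp hh)
        have hcond : PySem.Set.contains VALID_CATEGORIES (PySem.Str.lower (PySem.Str.strip cat)) = true
            ∧ PySem.Str.lower (PySem.Str.strip cat) ≠ "none"
            ∧ ¬ PySem.Set.contains s (PySem.Str.lower (PySem.Str.strip cat)) = true :=
          ⟨hv.1, hv.2, hsc⟩
        rw [if_pos hcond, List.foldl_cons]
        have ha : PySem.Set.add s (PySem.Str.lower (PySem.Str.strip cat)) = s ++ [PySem.Str.lower (PySem.Str.strip cat)] := by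
          simp [PySem.Set.add, hs]
        rw [ha]
        exact ih (s ++ [PySem.Str.lower (PySem.Str.strip cat)])
    · have hbool : (PySem.Set.contains VALID_CATEGORIES (PySem.Str.lower (PySem.Str.strip cat))
          && PySem.Str.lower (PySem.Str.strip cat) != "none") = false := by
        rw [Bool.eq_false_iff]
        simpa [Bool.and_eq_true, bne_iff_ne] using hv
      have hcond : ¬ (PySem.Set.contains VALID_CATEGORIES (PySem.Str.lower (PySem.Str.strip cat)) = true
          ∧ PySem.Str.lower (PySem.Str.strip cat) ≠ "none"
          ∧ ¬ PySem.Set.contains s (PySem.Str.lower (PySem.Str.strip cat)) = true) := by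
        intro hh; exact hv ⟨hh.1, hh.2.1⟩
      rw [if_neg hcond, hbool]
      simp only [Bool.false_eq_true, if_false]
      exact ih s

theorem dedup_run (C : List String) :
    C.foldl (fun st c => if PySem.Set.contains st.1 c then st else (PySem.Set.add st.1 c, st.2 ++ [c]))
      (PySem.Set.empty, ([] : List String)) = (PySem.Set.ofList C, PySem.Set.ofList C) := by
  rw [PySem.Set.ofList_eq_foldl]
  exact dedup_loop_eq C []

theorem alt_run (L : List String) :
    L.foldl (fun st cat =>
        let c := PySem.Str.lower (PySem.Str.strip cat)
        if PySem.Set.contains VALID_CATEGORIES c ∧ c ≠ "none" ∧ ¬ PySem.Set.contains st.1 c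
        then (PySem.Set.add st.1 c, st.2 ++ [c]) else st) (PySem.Set.empty, ([] : List String))
    = (PySem.Set.ofList ((L.map (fun cat => PySem.Str.lower (PySem.Str.strip cat))).filter
          (fun c => PySem.Set.contains VALID_CATEGORIES c && c != "none")),
       PySem.Set.ofList ((L.map (fun cat => PySem.Str.lower (PySem.Str.strip cat))).filter
          (fun c => PySem.Set.contains VALID_CATEGORIES c && c != "none"))) := by
  rw [PySem.Set.ofList_eq_foldl]
  exact alt_loop_eq L []

-- ===== VERDICT (by name: the statement is the Claim_ definition above) =====
theorem clean_categories_spec : Claim_equal_clean_categories := by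
  intro categories _
  unfold Spec_clean_categories clean_categories clean_categories_alt
  simp only [PySem.List.foldl_append_if, List.nil_append, alt_run, dedup_run, List.filter_map]
  set S := categories.filter (fun x => PySem.Set.contains VALID_CATEGORIES (PySem.Str.lower (PySem.Str.strip x))) with hS
  have h2 : S.filter ((fun c => decide (c ≠ "none")) ∘ fun x => PySem.Str.lower (PySem.Str.strip x))
      = S.filter (fun x => PySem.Str.lower (PySem.Str.strip x) != "none") := by
    apply List.filter_congr; intro x _
    simp only [Function.comp_apply, bne, Bool.beq_eq_decide_eq, decide_not]
  have h1 : categories.filter ((fun c => PySem.Set.contains VALID_CATEGORIES c && c != "none") ∘ fun x => PySem.Str.lower (PySem.Str.strip x))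
      = S.filter (fun x => PySem.Str.lower (PySem.Str.strip x) != "none") := by
    rw [hS, List.filter_filter]
    apply List.filter_congr; intro x _
    simp only [Function.comp_apply]
    exact Bool.and_comm _ _
  rw [h1, h2]
  set T := S.filter (fun x => PySem.Str.lower (PySem.Str.strip x) != "none") with hT
  by_cases hn : "none" ∈ S.map (fun x => PySem.Str.lower (PySem.Str.strip x))
  · by_cases hlen : (S.map (fun x => PySem.Str.lower (PySem.Str.strip x))).length > 1
    · have hc : (S.map (fun x => PySem.Str.lower (PySem.Str.strip x))).length > 1 ∧
          "none" ∈ S.map (fun x => PySem.Str.lower (PySem.Str.strip x)) := ⟨hlen, hn⟩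
      rw [if_pos hc]
    · have h0 : 0 < (S.map (fun x => PySem.Str.lower (PySem.Str.strip x))).length :=
        List.length_pos_of_mem hn
      have hlen1 : (S.map (fun x => PySem.Str.lower (PySem.Str.strip x))).length = 1 := by omega
      obtain ⟨a, ha⟩ := List.length_eq_one_iff.mp hlen1
      have ha' : a = "none" := by
        rw [ha] at hn
        have : "none" = a := by simpa using hn
        exact this.symm
      rw [ha'] at ha
      obtain ⟨x, hx, hFx⟩ := List.map_eq_singleton_iff.mp ha
      have hTnil : T = [] := by
        rw [hT, hx]
        simp [hFx]
      have hc : ¬ ((S.map (fun x => PySem.Str.lower (PySem.Str.strip x))).length > 1 ∧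
          "none" ∈ S.map (fun x => PySem.Str.lower (PySem.Str.strip x))) :=
        fun hh => absurd hh.1 (by omega)
      rw [if_neg hc, hTnil, ha]
      decide
  · have hc : ¬ ((S.map (fun x => PySem.Str.lower (PySem.Str.strip x))).length > 1 ∧
        "none" ∈ S.map (fun x => PySem.Str.lower (PySem.Str.strip x))) :=
      fun hh => hn hh.2
    rw [if_neg hc]
    have hTS : T = S := by
      rw [hT]
      apply List.filter_eq_self.mpr
      intro x hxS
      exact bne_iff_ne.mpr (fun he => hn (he ▸ List.mem_map_of_mem hxS))
    rw [hTS]
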